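-- pv_equiv track=rewrite | github.com/a23310295/ALGORITMOS_GRAFOS_23310295 | ENFOQUE_1/ALGORITMOS_GENETICOS/17.-Problemas_de_satisfaccion_de_restricciones.py | evaluar_restricciones
-- ===== SOURCE A (Python) =====
-- from typing import List, Tuple
--
-- def evaluar_restricciones(individuo: List[int]) -> int:
--     """Evalúa cuántas restricciones cumple el individuo"""
--     puntuacion = 0
--
--     # Restricción 1: Todas las variables deben ser diferentes
--     if len(set(individuo)) == len(individuo):
--         puntuacion += 10
--
--     # Restricción 2: La suma debe ser menor a 30
--     if sum(individuo) < 30: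
--         puntuacion += 5
--
--     # Restricción 3: Al menos 2 números pares
--     pares = sum(1 for x in individuo if x % 2 == 0)
--     if pares >= 2:
--         puntuacion += 5
--
--     return puntuacion
-- ===== SOURCE B (Python) =====
-- def evaluar_restricciones(individuo):
--     """Evalua cuantas restricciones cumple el individuo (sort-then-scan)."""
--     s = sorted(individuo)
--     unico = all(a != b for a, b in zip(s, s[1:]))
--     pares = len([x for x in individuo if x % 2 == 0])
--     return 10 * unico + 5 * (sum(s) < 30) + 5 * (pares >= 2)
-- ===== Notes on version B (the rewrite author's own statement) =====
-- stated objective: alternative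
-- what changed: A checks uniqueness by hashing into a set and builds the score with an if-chain; B sorts the list and detects duplicates by scanning adjacent pairs of the sorted copy, counts evens as the length of a filtered list, and computes the score arithmetically from boolean indicators.
import Mathlib
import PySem

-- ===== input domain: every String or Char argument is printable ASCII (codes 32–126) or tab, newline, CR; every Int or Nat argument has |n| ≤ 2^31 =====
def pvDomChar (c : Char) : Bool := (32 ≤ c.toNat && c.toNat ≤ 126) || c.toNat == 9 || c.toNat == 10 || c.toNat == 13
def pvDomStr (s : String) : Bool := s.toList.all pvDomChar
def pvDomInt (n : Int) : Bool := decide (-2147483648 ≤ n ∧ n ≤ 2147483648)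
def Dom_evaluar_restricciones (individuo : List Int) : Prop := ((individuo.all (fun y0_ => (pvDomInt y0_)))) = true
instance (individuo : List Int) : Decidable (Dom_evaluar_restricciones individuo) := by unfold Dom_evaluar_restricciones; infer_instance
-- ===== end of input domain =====

-- B replaces A's set-based uniqueness test and if-chain by sort-then-scan (adjacent pairs of
-- the sorted copy), a filter-length even count, and an arithmetic score (objective: alternative).

-- ===== PORT A =====
def evaluar_restricciones (individuo : List Int) : Int :=
  let puntuacion : Int := 0
  -- Restricción 1: len(set(individuo)) == len(individuo)
  let puntuacion := if (PySem.Set.ofList individuo).length = individuo.length then puntuacion + 10 else puntuacion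
  -- Restricción 2: sum(individuo) < 30
  let puntuacion := if individuo.sum < 30 then puntuacion + 5 else puntuacion
  -- Restricción 3: pares = sum(1 for x in individuo if x % 2 == 0)
  let pares : Int := (individuo.map (fun x => if PySem.Int.mod x 2 = 0 then (1 : Int) else 0)).sum
  let puntuacion := if pares ≥ 2 then puntuacion + 5 else puntuacion
  puntuacion

-- ===== PORT B =====
def evaluar_restricciones_alt (individuo : List Int) : Int :=
  -- s = sorted(individuo)
  let s := PySem.List.sorted individuo (fun x => x) false
  -- unico = all(a != b for a, b in zip(s, s[1:]))
  let unico := (s.zip (s.drop 1)).all (fun p => !(p.1 == p.2))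
  -- pares = len([x for x in individuo if x % 2 == 0])
  let pares : Int := ((individuo.filter (fun x => PySem.Int.mod x 2 = 0)).length : Int)
  -- 10 * unico + 5 * (sum(s) < 30) + 5 * (pares >= 2)
  10 * (if unico then (1 : Int) else 0)
    + 5 * (if s.sum < 30 then (1 : Int) else 0)
    + 5 * (if pares ≥ 2 then (1 : Int) else 0)

-- ===== PRECONDITION & SPEC =====
def Spec_evaluar_restricciones (individuo : List Int) (out : Int) : Prop := out = evaluar_restricciones_alt individuo
instance (individuo : List Int) (out : Int) : Decidable (Spec_evaluar_restricciones individuo out) := by unfold Spec_evaluar_restricciones; infer_instance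

-- ===== CLAIM (what is proved, stated in full; the proofs are below) =====
def Claim_equal_evaluar_restricciones : Prop := ∀ (individuo : List Int), Dom_evaluar_restricciones individuo → Spec_evaluar_restricciones individuo (evaluar_restricciones individuo)

-- ===== LEMMAS AND PROOFS =====

-- on a (non-strictly) sorted list, "no two adjacent elements are equal" is exactly Nodup
lemma pvAdj (s : List Int) (hs : s.Pairwise (· ≤ ·)) :
    ((s.zip (s.drop 1)).all (fun p => !(p.1 == p.2)) = true) ↔ s.Nodup := by
  induction s with
  | nil => simp
  | cons x t ih =>
    cases t with
    | nil => simp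
    | cons y t' =>
      have hx : ∀ z ∈ y :: t', x ≤ z := fun z hz => (List.pairwise_cons.mp hs).1 z hz
      have ht : (y :: t').Pairwise (· ≤ ·) := (List.pairwise_cons.mp hs).2
      have hy : ∀ z ∈ t', y ≤ z := fun z hz => (List.pairwise_cons.mp ht).1 z hz
      simp only [List.drop_one, List.tail_cons, List.zip_cons_cons, List.all_cons,
        Bool.and_eq_true] at ih ⊢
      rw [ih ht]
      constructor
      · rintro ⟨hne, hnd⟩
        have hxy : x ≠ y := by simpa using hne
        have hxmem : x ∉ y :: t' := by
          intro hmem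
          rcases List.mem_cons.mp hmem with h | h
          · exact hxy h
          · exact hxy (le_antisymm (hx y (List.mem_cons_self)) (hy x h))
        exact List.nodup_cons.mpr ⟨hxmem, hnd⟩
      · intro hnd
        rcases List.nodup_cons.mp hnd with ⟨hnm, hnd1⟩
        exact ⟨by simpa using fun h : x = y => hnm (by simp [h]), hnd1⟩

-- A's set-length uniqueness test is Nodup
lemma pvLen_ofList_iff (xs : List Int) : (PySem.Set.ofList xs).length = xs.length ↔ xs.Nodup := by
  have hp : (PySem.Set.ofList xs).Perm xs.dedup := by
    apply List.perm_of_nodup_nodup_toFinset_eq (PySem.Set.nodup_ofList xs) xs.nodup_dedup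
    ext a; simp [PySem.Set.mem_ofList]
  rw [hp.length_eq]
  constructor
  · intro h; rw [← List.dedup_eq_self]; exact (List.dedup_sublist xs).eq_of_length h
  · intro h; rw [List.dedup_eq_self.mpr h]

-- A's indicator sum is B's filter length
lemma pvCount (xs : List Int) (p : Int → Prop) [DecidablePred p] :
    ((xs.map (fun x => if p x then (1 : Int) else 0)).sum) = ((xs.filter (fun x => decide (p x))).length : Int) := by
  induction xs with
  | nil => simp
  | cons x t ih =>
    by_cases h : p x <;> simp [h, ih] <;> ring

-- ===== VERDICT (by name: the statement is the Claim_ definition above) =====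
theorem evaluar_restricciones_spec : Claim_equal_evaluar_restricciones := by
  intro xs _
  unfold Spec_evaluar_restricciones
  simp only [evaluar_restricciones, evaluar_restricciones_alt]
  have hperm : (PySem.List.sorted xs (fun x => x) false).Perm xs :=
    PySem.List.sorted_perm xs (fun x => x) false
  have h1 : ((PySem.List.sorted xs (fun x => x) false).zip
      ((PySem.List.sorted xs (fun x => x) false).drop 1)).all (fun p => !(p.1 == p.2)) = true
      ↔ (PySem.Set.ofList xs).length = xs.length := by
    rw [pvAdj _ (by simpa using PySem.List.sorted_pairwise xs (fun x => x)), hperm.nodup_iff,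
      pvLen_ofList_iff]
  have h2 : (PySem.List.sorted xs (fun x => x) false).sum = xs.sum := hperm.sum_eq
  rw [pvCount xs (fun x => PySem.Int.mod x 2 = 0), h2]
  simp only [h1]
  split_ifs <;> norm_num
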